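-- pv_equiv track=rewrite | github.com/alancast/LeetCodeProblems | python/medium/1182_shortest_distance_to_color.py | shortestDistanceColor
-- ===== SOURCE A (Python) =====
-- from collections import defaultdict
-- from typing import List
-- from bisect import bisect_left
--
-- def shortestDistanceColor(colors: List[int], queries: List[List[int]]) -> List[int]:
--     # Create and fill color to index mapping list
--     color_to_index_list_mapping = defaultdict(list)
--     for index, color in enumerate(colors):
--         color_to_index_list_mapping[color].append(index)
--
--     answer = []
--     for index, color in queries:
--         # If this color doesn't exist
--         if color not in color_to_index_list_mapping:
--             answer.append(-1)
--             continue
--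
--         # Get where this index would be placed in relation to indices of that color
--         # Then look at neighbors and see how close nearest is
--         color_indices = color_to_index_list_mapping[color]
--         insertion_index = bisect_left(color_indices, index)
--
--         # Check neighbors to find the closest
--         # If it goes at the end just append distance from the last one
--         if insertion_index == len(color_indices):
--             answer.append(index - color_indices[-1])
--         # If it goes at beginning find distance from first one
--         elif insertion_index == 0:
--             answer.append(color_indices[0] - index)
--         else:
--             # Distance to right neighbor
--             right = color_indices[insertion_index] - index
--             # Distance to left neighbor
--             left = index - color_indices[insertion_index - 1]
--             answer.append(min(left, right))
--
--     return answer
-- ===== SOURCE B (Python) =====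
-- from typing import List
--
-- def shortestDistanceColor(colors: List[int], queries: List[List[int]]) -> List[int]:
--     # For each query, take the minimum |i - index| over the positions of that color; -1 if absent.
--     return [
--         min((abs(i - index) for i, c in enumerate(colors) if c == color), default=-1)
--         for index, color in queries
--     ]
-- ===== Notes on version B (the rewrite author's own statement) =====
-- stated objective: idiomatic
-- what changed: A precomputes per-color sorted index lists and answers each query by binary search (bisect_left) among that color's positions; B drops the index and the bisection entirely and answers each query with a single comprehension taking min(|i - index|) over the positions of that color, with default -1 when the color is absent.
import Mathlib
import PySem

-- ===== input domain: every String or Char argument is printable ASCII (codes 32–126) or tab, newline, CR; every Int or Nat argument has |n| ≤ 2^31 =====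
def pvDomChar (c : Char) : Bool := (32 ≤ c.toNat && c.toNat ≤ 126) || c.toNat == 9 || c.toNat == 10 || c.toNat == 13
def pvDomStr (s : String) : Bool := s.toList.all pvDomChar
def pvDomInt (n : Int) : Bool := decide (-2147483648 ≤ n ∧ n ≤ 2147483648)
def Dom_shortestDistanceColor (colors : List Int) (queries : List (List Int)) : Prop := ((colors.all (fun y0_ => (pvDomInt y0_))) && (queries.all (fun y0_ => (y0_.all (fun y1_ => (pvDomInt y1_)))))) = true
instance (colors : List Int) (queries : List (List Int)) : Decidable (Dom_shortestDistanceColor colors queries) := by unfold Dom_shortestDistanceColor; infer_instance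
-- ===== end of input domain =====

-- B replaces A's per-color index lists + bisect_left neighbour search by a direct
-- min(|i - index|) comprehension per query (idiomatic one-liner; not faster).


-- ===== PORT A =====
-- color_to_index_list_mapping: defaultdict(list) filled by appending each index to its color's list
def pvBuildA (colors : List Int) : PySem.Dict Int (List Int) :=
  (PySem.List.enumerate colors).foldl
    (fun d p => d.insert p.2 (d.getD p.2 [] ++ [p.1])) PySem.Dict.empty

-- one iteration of A's query loop (ValueError on a query of length ≠ 2 — excluded by Pre_)
def pvStepA (m : PySem.Dict Int (List Int)) (answer : List Int) (q : List Int) : List Int :=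
  match q with
  | [index, color] =>
    match m.get? color with
    | none => answer ++ [-1]                       -- color not in mapping
    | some ci =>
      -- bisect_left on the (sorted) index list; PySem.List.bisectLeft is exact there
      let ins := PySem.List.bisectLeft ci index
      if ins = ci.length then answer ++ [index - PySem.List.pyGetD ci (-1) 0]
      else if ins = 0 then answer ++ [PySem.List.pyGetD ci 0 0 - index]
      else answer ++ [min (index - PySem.List.pyGetD ci ((ins : Int) - 1) 0)
                          (PySem.List.pyGetD ci (ins : Int) 0 - index)]
  | _ => answer

def shortestDistanceColor (colors : List Int) (queries : List (List Int)) : List Int :=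
  queries.foldl (pvStepA (pvBuildA colors)) []

-- ===== PORT B =====
-- min(（|i - index| for matching i), default=-1) per query; length-≠-2 queries raise (excluded by Pre_)
def shortestDistanceColor_alt (colors : List Int) (queries : List (List Int)) : List Int :=
  queries.map (fun q =>
    match q with
    | [index, color] =>
      PySem.List.minD
        (((PySem.List.enumerate colors).filter (fun p => p.2 == color)).map
          (fun p => |p.1 - index|))
        (fun x => x) (-1)
    | _ => 0)

-- ===== PRECONDITION & SPEC =====
-- Pre_ excludes only queries that are not 2-element [index, color] pairs: Python A (and B) raise ValueError unpacking them.
def Pre_shortestDistanceColor (colors : List Int) (queries : List (List Int)) : Prop :=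
  ∀ q ∈ queries, q.length = 2
instance (colors : List Int) (queries : List (List Int)) : Decidable (Pre_shortestDistanceColor colors queries) := by unfold Pre_shortestDistanceColor; infer_instance

def pvWitness_shortestDistanceColor : List Int × List (List Int) :=
  ([1, 2, 1], [[0, 1], [1, 2], [2, 3]])

def Spec_shortestDistanceColor (colors : List Int) (queries : List (List Int)) (out : List Int) : Prop := out = shortestDistanceColor_alt colors queries
instance (colors : List Int) (queries : List (List Int)) (out : List Int) : Decidable (Spec_shortestDistanceColor colors queries out) := by unfold Spec_shortestDistanceColor; infer_instance

-- ===== CLAIM (what is proved, stated in full; the proofs are below) =====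
def Claim_equal_shortestDistanceColor : Prop := ∀ (colors : List Int) (queries : List (List Int)), Dom_shortestDistanceColor colors queries → Pre_shortestDistanceColor colors queries → Spec_shortestDistanceColor colors queries (shortestDistanceColor colors queries)

-- ===== LEMMAS AND PROOFS =====

-- the per-color occurrence list both sides are really about
def pvOcc (colors : List Int) (color : Int) : List Int :=
  ((PySem.List.enumerate colors).filter (fun p => p.2 == color)).map (fun p => p.1)

-- A's dict lookup returns exactly the occurrence list (none iff the color is absent)
lemma pvBuild_general (l : List (Int × Int)) (d : PySem.Dict Int (List Int)) (c : Int) :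
    (l.foldl (fun d p => d.insert p.2 (d.getD p.2 [] ++ [p.1])) d).get? c =
      if (l.filter (fun p => p.2 == c)) = [] then d.get? c
      else some (d.getD c [] ++ (l.filter (fun p => p.2 == c)).map (fun p => p.1)) := by
  induction l generalizing d with
  | nil => simp
  | cons p t ih =>
    by_cases hp : p.2 = c
    · subst hp
      simp only [List.foldl_cons, List.filter_cons, beq_self_eq_true, if_pos, ih]
      rw [PySem.Dict.get?_insert_self, PySem.Dict.getD_insert_self]
      by_cases ht : (t.filter (fun p' => p'.2 == p.2)) = []
      · simp [ht]
      · simp [ht, List.append_assoc]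
    · have hne : c ≠ p.2 := fun h => hp h.symm
      simp only [List.foldl_cons, List.filter_cons, ih]
      rw [PySem.Dict.get?_insert_of_ne _ _ hne, PySem.Dict.getD_insert_of_ne _ _ _ hne]
      have hb : (p.2 == c) = false := by simp [hp]
      simp only [hb, Bool.false_eq_true, if_false]

lemma pvBuildA_get (colors : List Int) (c : Int) :
    (pvBuildA colors).get? c = if pvOcc colors c = [] then none else some (pvOcc colors c) := by
  unfold pvBuildA pvOcc
  rw [pvBuild_general]
  by_cases h : ((PySem.List.enumerate colors).filter (fun p => p.2 == c)) = [] <;> simp [h]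

-- the occurrence list is strictly increasing
lemma pvOcc_sorted (colors : List Int) (c : Int) : (pvOcc colors c).Pairwise (· < ·) := by
  unfold pvOcc
  rw [List.pairwise_map]
  exact (PySem.List.pairwise_lt_enumerate colors 0).filter _

-- on a strictly sorted list, bisect_left counts the elements below the probe
lemma pvBisect_eq_countP (xs : List Int) (x : Int) (hs : xs.Pairwise (· < ·)) :
    PySem.List.bisectLeft xs x = xs.countP (fun i => decide (i < x)) := by
  obtain ⟨hk, hlt, hge⟩ := PySem.List.bisectLeft_spec xs x (hs.imp le_of_lt)
  set k := PySem.List.bisectLeft xs x with hkdef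
  have h1 : (xs.take k).countP (fun i => decide (i < x)) = (xs.take k).length := by
    rw [List.countP_eq_length]
    intro a ha
    rw [List.mem_take_iff_getElem] at ha
    obtain ⟨j, hj, rfl⟩ := ha
    simp only [decide_eq_true_eq]
    exact hlt j (by omega) (by omega)
  have h2 : (xs.drop k).countP (fun i => decide (i < x)) = 0 := by
    rw [List.countP_eq_zero]
    intro a ha
    rw [List.mem_drop_iff_getElem] at ha
    obtain ⟨j, hj, rfl⟩ := ha
    simp only [decide_eq_true_eq, not_lt]
    exact hge (k + j) (by omega) (by omega)
  calc k = (xs.take k).length := by rw [List.length_take]; omega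
    _ = (xs.take k).countP (fun i => decide (i < x)) + (xs.drop k).countP (fun i => decide (i < x)) := by
          rw [h1, h2]; omega
    _ = xs.countP (fun i => decide (i < x)) := by rw [← List.countP_append, List.take_append_drop]

-- A's neighbour inspection, written with countP and total indexing
def pvNearest (ci : List Int) (idx : Int) : Int :=
  if ci.countP (fun i => decide (i < idx)) = ci.length then idx - ci.getLastD 0
  else if ci.countP (fun i => decide (i < idx)) = 0 then ci.headD 0 - idx
  else min (idx - ci.getD (ci.countP (fun i => decide (i < idx)) - 1) 0)
           (ci.getD (ci.countP (fun i => decide (i < idx))) 0 - idx)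

lemma pvFoldl_min_min (x y : Int) (l : List Int) :
    l.foldl min (min x y) = min x (l.foldl min y) := by
  induction l generalizing y with
  | nil => simp
  | cons z t ih => simp only [List.foldl_cons, min_assoc, ih]

-- prepending a strictly smaller index only helps when it is closer
lemma pvNearest_cons (idx a b : Int) (t : List Int)
    (hlt : ∀ y ∈ b :: t, a < y) :
    pvNearest (a :: b :: t) idx = min (|a - idx|) (pvNearest (b :: t) idx) := by
  have hcons : (a :: b :: t).countP (fun i => decide (i < idx)) =
      (b :: t).countP (fun i => decide (i < idx)) + (if a < idx then 1 else 0) := by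
    rw [List.countP_cons]
    by_cases ha : a < idx <;> simp [ha]
  set cR := (b :: t).countP (fun i => decide (i < idx)) with hcRdef
  have hcRle : cR ≤ (b :: t).length := List.countP_le_length
  have hb : a < b := hlt b (by simp)
  have hlast : a < t.getLastD b := by
    have : t.getLastD b ∈ b :: t := List.getLastD_mem_cons
    exact hlt _ this
  have hlen1 : (b :: t).length = t.length + 1 := by simp
  have hlen2 : (a :: b :: t).length = t.length + 2 := by simp
  unfold pvNearest
  rw [hcons, ← hcRdef]
  by_cases ha : a < idx
  · have hfa : |a - idx| = idx - a := by rw [abs_of_neg (by omega)]; omega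
    simp only [if_pos ha, Nat.add_sub_cancel, List.getD_cons_succ, List.getLastD_cons,
      List.headD_cons, hfa]
    by_cases hc0 : cR = 0
    · have hble : idx ≤ b := by
        have : ¬ (b < idx) := by
          have h0 := List.countP_eq_zero.mp (hcRdef ▸ hc0) b (by simp)
          simpa using h0
        omega
      simp only [hc0, List.getD_cons_zero, zero_add]
      split_ifs <;> first | exact (‹False›).elim | omega
    · have hcR1 : cR - 1 < (b :: t).length := by omega
      have hLmem : (b :: t).getD (cR - 1) 0 ∈ b :: t := by
        rw [List.getD_eq_getElem _ _ hcR1]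
        exact List.getElem_mem hcR1
      have hLgt : a < (b :: t).getD (cR - 1) 0 := hlt _ hLmem
      have hgetA : (a :: b :: t).getD cR 0 = (b :: t).getD (cR - 1) 0 := by
        rw [show cR = (cR - 1) + 1 by omega, List.getD_cons_succ, Nat.add_sub_cancel]
      rw [hgetA]
      split_ifs <;> first | exact (‹False›).elim | omega
  · -- idx ≤ a, hence below every stored index: both look at the first element
    have hfa : |a - idx| = a - idx := by rw [abs_of_nonneg (by omega)]
    have hcR0 : cR = 0 := by
      rw [hcRdef, List.countP_eq_zero]
      intro y hy
      have := hlt y hy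
      simp only [decide_eq_true_eq, not_lt]
      omega
    simp only [if_neg ha, hcR0, Nat.add_zero, List.getLastD_cons, List.headD_cons, hfa]
    split_ifs <;> first | exact (‹False›).elim | omega

-- A's neighbour inspection equals B's running minimum of the distances
lemma pvNearest_eq_foldl (idx : Int) (a : Int) (rest : List Int)
    (hs : (a :: rest).Pairwise (· < ·)) :
    pvNearest (a :: rest) idx =
      (rest.map (fun i => |i - idx|)).foldl min (|a - idx|) := by
  induction rest generalizing a with
  | nil =>
    unfold pvNearest
    by_cases h : a < idx
    · simp [h, abs_of_neg (show a - idx < 0 by omega)]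
      try omega
    · simp [h, abs_of_nonneg (show (0:Int) ≤ a - idx by omega)]
      try omega
  | cons b t ih =>
    have hs' : (b :: t).Pairwise (· < ·) := (List.pairwise_cons.mp hs).2
    rw [pvNearest_cons idx a b t (List.pairwise_cons.mp hs).1, ih b hs']
    simp only [List.map_cons, List.foldl_cons]
    rw [pvFoldl_min_min]

-- one query of A's loop produces exactly B's per-query value
lemma pvStep_eq (colors : List Int) (i c : Int) (acc : List Int) :
    pvStepA (pvBuildA colors) acc [i, c] =
      acc ++ [PySem.List.minD
        (((PySem.List.enumerate colors).filter (fun p => p.2 == c)).map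
          (fun p => |p.1 - i|)) (fun x => x) (-1)] := by
  have hmap : ((PySem.List.enumerate colors).filter (fun p => p.2 == c)).map
      (fun p => |p.1 - i|) = (pvOcc colors c).map (fun j => |j - i|) := by
    unfold pvOcc; rw [List.map_map]; rfl
  show (match (pvBuildA colors).get? c with
    | none => acc ++ [-1]
    | some ci =>
      let ins := PySem.List.bisectLeft ci i
      if ins = ci.length then acc ++ [i - PySem.List.pyGetD ci (-1) 0]
      else if ins = 0 then acc ++ [PySem.List.pyGetD ci 0 0 - i]
      else acc ++ [min (i - PySem.List.pyGetD ci ((ins : Int) - 1) 0)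
                       (PySem.List.pyGetD ci (ins : Int) 0 - i)]) = _
  rw [pvBuildA_get]
  by_cases h : pvOcc colors c = []
  · rw [if_pos h]
    rw [hmap, h]
    simp [PySem.List.minD, PySem.List.min?]
  · rw [if_neg h]
    obtain ⟨a, rest, hocc⟩ := List.exists_cons_of_ne_nil h
    have hsorted : (pvOcc colors c).Pairwise (· < ·) := pvOcc_sorted colors c
    have hsorted' : (a :: rest).Pairwise (· < ·) := hocc ▸ hsorted
    -- B's side: minD over a nonempty list is the running minimum
    rw [hmap, hocc, List.map_cons]
    rw [show PySem.List.minD (|a - i| :: rest.map (fun j => |j - i|)) (fun x => x) (-1) =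
        ((rest.map (fun j => |j - i|)).foldl min (|a - i|)) from by
      simp [PySem.List.minD, PySem.List.min?_id_cons]]
    -- A's side: rewrite bisect and the pyGetD indexings into pvNearest
    rw [← pvNearest_eq_foldl i a rest hsorted']
    have hbis : PySem.List.bisectLeft (a :: rest) i =
        (a :: rest).countP (fun j => decide (j < i)) := pvBisect_eq_countP _ _ hsorted'
    set ins := PySem.List.bisectLeft (a :: rest) i with hins
    unfold pvNearest
    simp only [← hbis]
    by_cases h1 : ins = (a :: rest).length
    · rw [if_pos h1, if_pos h1]
      have hlastd : PySem.List.pyGetD (a :: rest) (-1) 0 = (a :: rest).getLastD 0 := by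
        rw [PySem.List.pyGetD_neg_one (a :: rest) 0 (show (a :: rest) ≠ [] by simp)]
        simp [List.getLastD_eq_getLast?, List.getLast?_eq_some_getLast]
      rw [hlastd]
    · rw [if_neg h1, if_neg h1]
      by_cases h0 : ins = 0
      · rw [if_pos h0, if_pos h0]
        rw [PySem.List.pyGetD_zero_cons]
        rfl
      · rw [if_neg h0, if_neg h0]
        have hc1 : ((ins : Int) - 1) = ((ins - 1 : Nat) : Int) := by omega
        rw [hc1, PySem.List.pyGetD_natCast, PySem.List.pyGetD_natCast]

lemma pvFold_eq (colors : List Int) (qs : List (List Int)) (acc : List Int)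
    (h : ∀ q ∈ qs, q.length = 2) :
    qs.foldl (pvStepA (pvBuildA colors)) acc =
      acc ++ shortestDistanceColor_alt colors qs := by
  induction qs generalizing acc with
  | nil => simp [shortestDistanceColor_alt]
  | cons q t ih =>
    match q, h q (by simp) with
    | [i, c], _ =>
      rw [List.foldl_cons, pvStep_eq, ih _ (fun q hq => h q (by simp [hq]))]
      simp [shortestDistanceColor_alt, List.append_assoc]

-- ===== VERDICT (by name: the statement is the Claim_ definition above) =====
theorem shortestDistanceColor_spec : Claim_equal_shortestDistanceColor := by
  intro colors queries _ hpre
  unfold Spec_shortestDistanceColor shortestDistanceColor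
  rw [pvFold_eq colors queries [] hpre]
  simp
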